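-- pv_equiv track=rewrite | github.com/bunbohue19/Mazii_AI-edge_machine_translation | src/data-statistics/dataset_stats.py | duplicate_counts
-- ===== SOURCE A (Python) =====
-- from collections import Counter, defaultdict
-- from typing import Iterable, List, Mapping, MutableMapping, Sequence
--
-- def duplicate_counts(values: Iterable[str]) -> Mapping[str, int]:
--     """Count duplicate values and how many rows are repeats beyond the first."""
--     counts = Counter(values)
--     dup_values = {val: cnt for val, cnt in counts.items() if cnt > 1}
--     return {
--         "unique_values": len(counts),
--         "duplicate_values": len(dup_values),
--         "rows_beyond_first": sum(cnt - 1 for cnt in dup_values.values()),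
--     }
-- ===== SOURCE B (Python) =====
-- def duplicate_counts(values):
--     """Count duplicate values and how many rows are repeats beyond the first."""
--     seen = set()
--     duplicates = set()
--     total = 0
--     for v in values:
--         if v in seen:
--             duplicates.add(v)
--         else:
--             seen.add(v)
--         total += 1
--     return {
--         "unique_values": len(seen),
--         "duplicate_values": len(duplicates),
--         "rows_beyond_first": total - len(seen),
--     }
-- ===== Notes on version B (the rewrite author's own statement) =====
-- stated objective: simpler
-- what changed: One pass maintaining two presence sets (seen, duplicates) and a running total replaces the Counter build plus a filtering dict comprehension plus a summation pass; rows_beyond_first is computed as total - len(seen) instead of summing cnt-1 over duplicate counts.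
import Mathlib
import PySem

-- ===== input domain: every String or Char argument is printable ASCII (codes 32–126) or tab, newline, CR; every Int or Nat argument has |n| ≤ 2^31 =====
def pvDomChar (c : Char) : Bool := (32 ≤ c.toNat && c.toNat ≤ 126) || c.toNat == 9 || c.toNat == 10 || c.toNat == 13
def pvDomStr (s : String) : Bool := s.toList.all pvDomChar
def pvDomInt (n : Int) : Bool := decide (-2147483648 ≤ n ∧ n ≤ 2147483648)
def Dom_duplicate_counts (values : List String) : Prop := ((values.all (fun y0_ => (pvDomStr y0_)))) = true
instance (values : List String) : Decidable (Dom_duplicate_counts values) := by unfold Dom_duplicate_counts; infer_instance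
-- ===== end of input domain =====

-- B replaces Counter + filtering comprehension + summation pass by one pass with two
-- presence sets and a running total (objective: simpler).

-- ===== PORT A =====
def duplicate_counts (values : List String) : List (String × Int) :=
  let counts := PySem.Dict.counter values
  let dup_values := counts.items.filter (fun p => 1 < p.2)
  [("unique_values", (counts.items.length : Int)),
   ("duplicate_values", (dup_values.length : Int)),
   ("rows_beyond_first", (dup_values.map (fun p => p.2 - 1)).sum)]

-- ===== PORT B =====
def duplicate_counts_alt (values : List String) : List (String × Int) :=
  let st := values.foldl
    (fun (st : PySem.Set String × PySem.Set String × Int) v =>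
      if st.1.contains v then (st.1, st.2.1.add v, st.2.2 + 1)
      else (st.1.add v, st.2.1, st.2.2 + 1))
    (PySem.Set.empty, PySem.Set.empty, 0)
  [("unique_values", (st.1.length : Int)),
   ("duplicate_values", (st.2.1.length : Int)),
   ("rows_beyond_first", st.2.2 - st.1.length)]

-- ===== PRECONDITION & SPEC =====
def Spec_duplicate_counts (values : List String) (out : List (String × Int)) : Prop := out = duplicate_counts_alt values
instance (values : List String) (out : List (String × Int)) : Decidable (Spec_duplicate_counts values out) := by unfold Spec_duplicate_counts; infer_instance

-- ===== CLAIM (what is proved, stated in full; the proofs are below) =====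
def Claim_equal_duplicate_counts : Prop := ∀ (values : List String), Dom_duplicate_counts values → Spec_duplicate_counts values (duplicate_counts values)

-- ===== LEMMAS AND PROOFS =====

-- The invariant tying A's counter dict to B's (seen, duplicates, total) state.
def DCInv (d : PySem.Dict String Int) (seen dups : PySem.Set String) (total : Int) : Prop :=
  seen = d.items.map Prod.fst ∧
  dups.Nodup ∧
  (∀ k, k ∈ dups ↔ 1 < d.getD k 0) ∧
  total = (d.items.map Prod.snd).sum ∧
  (∀ p ∈ d.items, 1 ≤ p.2) ∧
  (d.items.map Prod.fst).Nodup

-- first-match lookup on a list with nodup keys returns the unique entry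
theorem dc_find?_eq_some {l : List (String × Int)} {k : String} {c : Int}
    (hnd : (l.map Prod.fst).Nodup) (hmem : (k, c) ∈ l) :
    List.find? (fun p => p.1 == k) l = some (k, c) := by
  induction l with
  | nil => cases hmem
  | cons p l ih =>
    simp only [List.map_cons, List.nodup_cons] at hnd
    rcases List.mem_cons.1 hmem with h | h
    · subst h; simp [List.find?]
    · have hpk : p.1 ≠ k := by
        intro he; exact hnd.1 (he ▸ (List.mem_map.2 ⟨(k, c), h, rfl⟩))
      have hb : (p.1 == k) = false := by simp [hpk]
      simp only [List.find?, hb]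
      exact ih hnd.2 h

theorem dc_getD_of_mem {d : PySem.Dict String Int} {k : String} {c : Int}
    (hnd : (d.items.map Prod.fst).Nodup) (hmem : (k, c) ∈ d.items) :
    d.getD k 0 = c := by
  simp [PySem.Dict.getD, PySem.Dict.get?, dc_find?_eq_some hnd hmem]

theorem dc_mem_of_getD {d : PySem.Dict String Int} {k : String}
    (h : d.getD k 0 ≠ 0) : (k, d.getD k 0) ∈ d.items := by
  simp only [PySem.Dict.getD, PySem.Dict.get?] at h ⊢
  cases hf : List.find? (fun p => p.1 == k) d.items with
  | none => simp [hf] at h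
  | some p =>
    have hp := List.find?_eq_some_iff_append.1 hf |>.1
    have hmem := List.mem_of_find?_eq_some hf
    simp only [beq_iff_eq] at hp
    simpa [hf, ← hp] using hmem

-- Set.add preserves Nodup
theorem dc_nodup_add {s : PySem.Set String} (h : s.Nodup) (x : String) :
    (s.add x).Nodup := by
  unfold PySem.Set.add
  split
  · exact h
  · next hc =>
    have hx : x ∉ s := by simpa [PySem.Set.contains, List.contains_eq_mem] using hc
    simp [List.nodup_append, h]
    intro a ha he
    exact hx (he ▸ ha)

-- updating the unique entry for key k bumps the value sum by 1 and keeps the keys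
theorem dc_sum_update {l : List (String × Int)} {v : String} {c : Int}
    (hnd : (l.map Prod.fst).Nodup) (hmem : (v, c) ∈ l) :
    ((l.map (fun p => if p.1 == v then (v, c + 1) else p)).map Prod.snd).sum
      = (l.map Prod.snd).sum + 1 := by
  induction l with
  | nil => cases hmem
  | cons p l ih =>
    simp only [List.map_cons, List.nodup_cons] at hnd
    rcases List.mem_cons.1 hmem with h | h
    · subst h
      have : ∀ q ∈ l, (fun p => if p.1 == v then (v, c + 1) else p) q = q := by
        intro q hq
        have : q.1 ≠ v := fun he => hnd.1 (he ▸ (List.mem_map.2 ⟨q, hq, rfl⟩))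
        simp [this]
      simp only [List.map_cons, beq_self_eq_true, if_pos]
      rw [List.map_congr_left this]
      simp; ring
    · have hpv : p.1 ≠ v := fun he => hnd.1 (he ▸ (List.mem_map.2 ⟨(v, c), h, rfl⟩))
      have hb : (p.1 == v) = false := by simp [hpv]
      simp only [List.map_cons, List.sum_cons, hb, Bool.false_eq_true, if_false]
      rw [ih hnd.2 h]; ring

theorem dc_keys_update (l : List (String × Int)) (v : String) (c : Int) :
    (l.map (fun p => if p.1 == v then (v, c) else p)).map Prod.fst = l.map Prod.fst := by
  induction l with
  | nil => rfl
  | cons p l ih =>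
    by_cases h : p.1 = v
    · have hb : (p.1 == v) = true := by simp [h]
      simp only [List.map_cons, hb, if_true, ih]
      simp [h]
    · have hb : (p.1 == v) = false := by simp [h]
      simp only [List.map_cons, hb, Bool.false_eq_true, if_false, ih]

-- the invariant is preserved by one step of each loop
theorem dc_inv_step {d : PySem.Dict String Int} {seen dups : PySem.Set String} {total : Int}
    (h : DCInv d seen dups total) (v : String) :
    DCInv (d.modify v 0 (· + 1))
      (if seen.contains v then seen else seen.add v)
      (if seen.contains v then dups.add v else dups)
      (total + 1) := by
  obtain ⟨hseen, hdn, hdm, htot, hpos, hnd⟩ := h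
  have hcont : seen.contains v = d.contains v := by
    apply Bool.eq_iff_iff.mpr
    simp only [hseen, PySem.Set.contains, List.contains_eq_mem, decide_eq_true_eq,
      PySem.Dict.contains, List.any_eq_true, List.mem_map, beq_iff_eq]
  by_cases hv : d.contains v = true
  · -- v already a key: entry updated in place
    obtain ⟨p, hpmem, hpk⟩ : ∃ p ∈ d.items, p.1 = v := by
      simpa [PySem.Dict.contains, List.any_eq_true] using hv
    obtain ⟨c, rfl⟩ : ∃ c, p = (v, c) := ⟨p.2, by rw [← hpk]⟩
    have hget : d.getD v 0 = c := dc_getD_of_mem hnd hpmem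
    have hc1 : 1 ≤ c := hpos _ hpmem
    have hitems : (d.modify v 0 (· + 1)).items
        = d.items.map (fun p => if p.1 == v then (v, c + 1) else p) := by
      simp [PySem.Dict.modify, PySem.Dict.insert, hv, hget]
    rw [hcont, if_pos hv, if_pos hv]
    refine ⟨?_, dc_nodup_add hdn v, ?_, ?_, ?_, ?_⟩
    · rw [hitems, dc_keys_update, hseen]
    · intro k
      rw [PySem.Set.mem_add]
      have := PySem.Dict.getD_insert d v k (c + 1) 0
      simp only [PySem.Dict.modify, hget] at *
      rw [this]
      by_cases hk : k = v
      · subst hk; simp [hdm k]; omega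
      · simp [hk, hdm k]
    · rw [hitems, dc_sum_update hnd hpmem, htot]
    · intro q hq
      rw [hitems] at hq
      obtain ⟨r, hr, hrq⟩ := List.mem_map.1 hq
      by_cases hrk : r.1 = v
      · simp only [hrk, beq_self_eq_true, if_pos] at hrq
        subst hrq; simp; omega
      · simp only [beq_iff_eq, hrk, if_neg, not_false_iff] at hrq
        exact hrq ▸ hpos r hr
    · rw [hitems, dc_keys_update]; exact hnd
  · -- v not a key: appended with count 1
    have hget : d.getD v 0 = 0 := by
      simp only [PySem.Dict.getD, PySem.Dict.get?]
      cases hf : List.find? (fun p => p.1 == v) d.items with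
      | none => simp
      | some p =>
        exfalso; apply hv
        have hp := List.find?_some hf
        simp only [PySem.Dict.contains, List.any_eq_true]
        exact ⟨p, List.mem_of_find?_eq_some hf, hp⟩
    have hitems : (d.modify v 0 (· + 1)).items = d.items ++ [(v, 1)] := by
      simp [PySem.Dict.modify, PySem.Dict.insert, hv, hget]
    have hvseen : v ∉ seen := by
      rw [hseen]; intro hmem
      obtain ⟨p, hp, hpv⟩ := List.mem_map.1 hmem
      exact hv (by simp only [PySem.Dict.contains, List.any_eq_true]; exact ⟨p, hp, by simp [hpv]⟩)
    have hvcont : seen.contains v = false := by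
      simp [PySem.Set.contains, List.contains_eq_mem, hvseen]
    rw [hvcont]
    simp only [Bool.false_eq_true, if_neg, not_false_iff]
    refine ⟨?_, hdn, ?_, ?_, ?_, ?_⟩
    · rw [PySem.Set.add, if_neg (by simp [hvseen])]
      simp [hitems, hseen]
    · intro k
      simp only [PySem.Dict.modify, hget, zero_add]
      rw [PySem.Dict.getD_insert]
      by_cases hk : k = v
      · subst hk
        constructor
        · intro hkd; have := (hdm k).1 hkd; omega
        · omega
      · simp [hk, hdm k]
    · rw [hitems]; simp [htot]
    · intro q hq
      rw [hitems] at hq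
      rcases List.mem_append.1 hq with h | h
      · exact hpos q h
      · have hq1 : q = (v, (1 : Int)) := by simpa using h
        rw [hq1]
    · rw [hitems]
      simp only [List.map_append, List.map_cons, List.map_nil]
      apply List.Nodup.append hnd (List.nodup_singleton v)
      intro a ha hb
      simp only [List.mem_singleton] at hb
      subst hb
      obtain ⟨p, hp, hpv⟩ := List.mem_map.1 ha
      exact hv (by simp only [PySem.Dict.contains, List.any_eq_true]; exact ⟨p, hp, by simp [hpv]⟩)

-- the invariant holds after both folds
theorem dc_inv_fold (values : List String) {d : PySem.Dict String Int}
    {seen dups : PySem.Set String} {total : Int} (h : DCInv d seen dups total) :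
    DCInv (values.foldl (fun d x => d.modify x 0 (· + 1)) d)
      (values.foldl
        (fun (st : PySem.Set String × PySem.Set String × Int) v =>
          if st.1.contains v then (st.1, st.2.1.add v, st.2.2 + 1)
          else (st.1.add v, st.2.1, st.2.2 + 1)) (seen, dups, total)).1
      (values.foldl
        (fun (st : PySem.Set String × PySem.Set String × Int) v =>
          if st.1.contains v then (st.1, st.2.1.add v, st.2.2 + 1)
          else (st.1.add v, st.2.1, st.2.2 + 1)) (seen, dups, total)).2.1
      (values.foldl
        (fun (st : PySem.Set String × PySem.Set String × Int) v =>
          if st.1.contains v then (st.1, st.2.1.add v, st.2.2 + 1)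
          else (st.1.add v, st.2.1, st.2.2 + 1)) (seen, dups, total)).2.2 := by
  induction values generalizing d seen dups total with
  | nil => simpa using h
  | cons v vs ih =>
    simp only [List.foldl_cons]
    have := dc_inv_step h v
    by_cases hc : seen.contains v = true
    · rw [if_pos hc] at this ⊢
      rw [hc] at this  -- no-op if already true
      simpa using ih this
    · rw [if_neg hc] at this ⊢
      simp only [Bool.not_eq_true] at hc
      rw [hc] at this
      simp only [Bool.false_eq_true, if_neg, not_false_iff] at this
      simpa using ih this

-- counting the duplicate keys: the filtered entries correspond to dups
theorem dc_filter_length {d : PySem.Dict String Int} {dups : PySem.Set String}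
    (hdn : dups.Nodup) (hdm : ∀ k, k ∈ dups ↔ 1 < d.getD k 0)
    (hnd : (d.items.map Prod.fst).Nodup) :
    (d.items.filter (fun p => 1 < p.2)).length = dups.length := by
  have hsub : ((d.items.filter (fun p => 1 < p.2)).map Prod.fst).Sublist
      (d.items.map Prod.fst) :=
    List.Sublist.map Prod.fst List.filter_sublist
  have hfnd : ((d.items.filter (fun p => 1 < p.2)).map Prod.fst).Nodup := hnd.sublist hsub
  have hperm : ((d.items.filter (fun p => 1 < p.2)).map Prod.fst).Perm dups := by
    apply List.perm_of_nodup_nodup_toFinset_eq hfnd hdn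
    apply Finset.ext
    intro k
    simp only [List.mem_toFinset, List.mem_map, List.mem_filter, decide_eq_true_eq]
    rw [hdm k]
    constructor
    · rintro ⟨p, ⟨hp, hlt⟩, rfl⟩
      rw [dc_getD_of_mem hnd (show (p.1, p.2) ∈ d.items by simpa using hp)]
      exact hlt
    · intro hlt
      have hne : d.getD k 0 ≠ 0 := by omega
      exact ⟨(k, d.getD k 0), ⟨dc_mem_of_getD hne, hlt⟩, rfl⟩
  calc (d.items.filter (fun p => 1 < p.2)).length
      = ((d.items.filter (fun p => 1 < p.2)).map Prod.fst).length := by rw [List.length_map]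
    _ = dups.length := hperm.length_eq

-- summing cnt-1 over the duplicates equals total minus the number of distinct keys
theorem dc_sum_filter (l : List (String × Int)) (hpos : ∀ p ∈ l, 1 ≤ p.2) :
    ((l.filter (fun p => 1 < p.2)).map (fun p => p.2 - 1)).sum
      = (l.map Prod.snd).sum - l.length := by
  induction l with
  | nil => simp
  | cons p l ih =>
    have hp := hpos p (List.mem_cons_self ..)
    have ihl := ih (fun q hq => hpos q (List.mem_cons_of_mem _ hq))
    by_cases h : 1 < p.2
    · rw [List.filter_cons_of_pos (by simpa using h)]
      simp only [List.map_cons, List.sum_cons, List.length_cons, ihl]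
      push_cast; ring
    · rw [List.filter_cons_of_neg (by simpa using h)]
      have hp2 : p.2 = 1 := by omega
      simp only [List.sum_cons, List.length_cons, ihl, List.map_cons, hp2]
      push_cast; ring

-- ===== VERDICT (by name: the statement is the Claim_ definition above) =====
theorem duplicate_counts_spec : Claim_equal_duplicate_counts := by
  unfold Claim_equal_duplicate_counts
  intro values _
  simp only [Spec_duplicate_counts, duplicate_counts, duplicate_counts_alt]
  have hinit : DCInv PySem.Dict.empty PySem.Set.empty PySem.Set.empty 0 := by
    refine ⟨rfl, List.nodup_nil, ?_, rfl, by simp [PySem.Dict.empty], by simp [PySem.Dict.empty]⟩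
    intro k; simp [PySem.Set.empty, PySem.Dict.empty, PySem.Dict.getD, PySem.Dict.get?]
  have hinv := dc_inv_fold values hinit
  obtain ⟨hseen, hdn, hdm, htot, hpos, hnd⟩ := hinv
  simp only [PySem.Dict.counter, List.cons.injEq, Prod.mk.injEq, true_and, and_true]
  refine ⟨?_, ?_, ?_⟩
  · rw [hseen, List.length_map]
  · rw [dc_filter_length hdn hdm hnd]
  · rw [dc_sum_filter _ hpos, ← htot, hseen, List.length_map]
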